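-- pv_equiv track=rewrite | github.com/anabarrsm/p1ufcg | 05.mais_consoantes/consoantes.py | conta_consoantes
-- ===== SOURCE A (Python) =====
-- def conta_consoantes(palavra):
--     consoantes = "bcdfghjklmnpqrstvwxyz"
--     vogais = "aeiou"
--     vogais_cont = 0
--     consoantes_cont = 0
--
--     for l in palavra:
--         if l.lower() in vogais:
--             vogais_cont += 1
--
--         elif l.lower() in consoantes:
--             consoantes_cont += 1
--
--     return consoantes_cont > vogais_cont
-- ===== SOURCE B (Python) =====
-- def conta_consoantes(palavra):
--     # tabulate-then-aggregate: build a frequency table of the lowercased word,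
--     # then sum the tabulated counts over the fixed vowel/consonant alphabets
--     freq = {}
--     for ch in palavra.lower():
--         freq[ch] = freq.get(ch, 0) + 1
--     vogais_cont = sum(freq.get(v, 0) for v in "aeiou")
--     consoantes_cont = sum(freq.get(c, 0) for c in "bcdfghjklmnpqrstvwxyz")
--     return consoantes_cont > vogais_cont
-- ===== Notes on version B (the rewrite author's own statement) =====
-- stated objective: idiomatic
-- what changed: B lowercases the word once, tabulates character frequencies into a dict in one pass, and then aggregates the tabulated counts over the fixed vowel and consonant alphabets, instead of A's per-character branch-and-increment with two running counters.
import Mathlib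
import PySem

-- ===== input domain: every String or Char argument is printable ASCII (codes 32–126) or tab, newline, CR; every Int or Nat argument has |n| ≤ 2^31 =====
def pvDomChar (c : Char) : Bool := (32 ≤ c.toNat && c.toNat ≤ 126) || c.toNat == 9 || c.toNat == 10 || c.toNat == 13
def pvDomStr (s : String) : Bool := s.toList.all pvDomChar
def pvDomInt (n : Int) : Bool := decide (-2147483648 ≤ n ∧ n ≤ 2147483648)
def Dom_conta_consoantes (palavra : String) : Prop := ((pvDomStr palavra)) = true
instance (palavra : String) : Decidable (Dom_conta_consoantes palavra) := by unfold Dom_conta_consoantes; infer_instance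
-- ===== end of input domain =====

-- B tabulates lowercased-character frequencies into a dict and aggregates them over the
-- fixed vowel/consonant alphabets, instead of A's per-character branch-and-increment (idiomatic).


-- ===== PORT A =====
-- 'l.lower() in vogais': l is a single character, so Python's substring test equals
-- char membership of the lowered char in the chars of the literal (exact here).
def conta_consoantes (palavra : String) : Bool :=
  let consoantes := "bcdfghjklmnpqrstvwxyz"
  let vogais := "aeiou"
  let r := palavra.toList.foldl
    (fun (s : Int × Int) l =>
      if PySem.Chars.lowerChar l ∈ vogais.toList then (s.1 + 1, s.2)
      else if PySem.Chars.lowerChar l ∈ consoantes.toList then (s.1, s.2 + 1)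
      else s) ((0 : Int), (0 : Int))
  r.2 > r.1

-- ===== PORT B =====
def conta_consoantes_alt (palavra : String) : Bool :=
  let freq := (PySem.Str.lower palavra).toList.foldl
      (fun (d : PySem.Dict Char Int) ch => d.insert ch (d.getD ch 0 + 1)) PySem.Dict.empty
  let vogais_cont := ("aeiou".toList).foldl (fun a v => a + freq.getD v 0) (0 : Int)
  let consoantes_cont := ("bcdfghjklmnpqrstvwxyz".toList).foldl (fun a c => a + freq.getD c 0) (0 : Int)
  consoantes_cont > vogais_cont

-- ===== PRECONDITION & SPEC =====
def Spec_conta_consoantes (palavra : String) (out : Bool) : Prop := out = conta_consoantes_alt palavra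
instance (palavra : String) (out : Bool) : Decidable (Spec_conta_consoantes palavra out) := by unfold Spec_conta_consoantes; infer_instance

-- ===== CLAIM (what is proved, stated in full; the proofs are below) =====
def Claim_equal_conta_consoantes : Prop := ∀ (palavra : String), Dom_conta_consoantes palavra → Spec_conta_consoantes palavra (conta_consoantes palavra)

-- ===== LEMMAS AND PROOFS =====

-- A's loop: the two counters end at (countP vowel, countP consonant).
theorem pvA_fold (cs : List Char) (v c : Int) :
    cs.foldl
      (fun (s : Int × Int) l =>
        if PySem.Chars.lowerChar l ∈ "aeiou".toList then (s.1 + 1, s.2)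
        else if PySem.Chars.lowerChar l ∈ "bcdfghjklmnpqrstvwxyz".toList then (s.1, s.2 + 1)
        else s) (v, c)
    = (v + (cs.countP (fun l => PySem.Chars.lowerChar l ∈ "aeiou".toList) : Nat),
       c + (cs.countP (fun l => PySem.Chars.lowerChar l ∉ "aeiou".toList ∧
                                PySem.Chars.lowerChar l ∈ "bcdfghjklmnpqrstvwxyz".toList) : Nat)) := by
  induction cs generalizing v c with
  | nil => simp
  | cons x xs ih =>
    rw [List.foldl_cons, List.countP_cons, List.countP_cons]
    by_cases hv : PySem.Chars.lowerChar x ∈ "aeiou".toList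
    · have hnc : ¬(PySem.Chars.lowerChar x ∉ "aeiou".toList ∧
          PySem.Chars.lowerChar x ∈ "bcdfghjklmnpqrstvwxyz".toList) := fun h => h.1 hv
      rw [if_pos hv, ih, decide_eq_true hv, decide_eq_false hnc, Prod.mk.injEq]
      constructor <;> simp <;> omega
    · by_cases hc : PySem.Chars.lowerChar x ∈ "bcdfghjklmnpqrstvwxyz".toList
      · have hyc : (PySem.Chars.lowerChar x ∉ "aeiou".toList ∧
            PySem.Chars.lowerChar x ∈ "bcdfghjklmnpqrstvwxyz".toList) := ⟨hv, hc⟩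
        rw [if_neg hv, if_pos hc, ih, decide_eq_false hv, decide_eq_true hyc, Prod.mk.injEq]
        constructor <;> simp <;> omega
      · have hnc : ¬(PySem.Chars.lowerChar x ∉ "aeiou".toList ∧
            PySem.Chars.lowerChar x ∈ "bcdfghjklmnpqrstvwxyz".toList) := fun h => hc h.2
        rw [if_neg hv, if_neg hc, ih, decide_eq_false hv, decide_eq_false hnc, Prod.mk.injEq]
        constructor <;> simp

-- countP of membership in a cons'd alphabet splits off a count, given x not already listed.
theorem pvCountP_cons (ys : List Char) (x : Char) (L : List Char) (hx : x ∉ L) :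
    ys.countP (fun y => decide (y ∈ x :: L))
      = ys.count x + ys.countP (fun y => decide (y ∈ L)) := by
  induction ys with
  | nil => simp
  | cons y ys ih =>
    rw [List.countP_cons, List.countP_cons, List.count_cons, ih]
    by_cases hyx : y = x
    · subst hyx
      simp [hx]
      omega
    · by_cases hyL : y ∈ L <;> simp [hyx, hyL] <;> omega

-- B's aggregation loop over a duplicate-free alphabet sums to a countP of membership.
theorem pvB_sum (L : List Char) (hL : L.Nodup) (ys : List Char) (a : Int) :
    L.foldl (fun a x => a + (ys.count x : Int)) a
      = a + (ys.countP (fun y => decide (y ∈ L)) : Nat) := by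
  induction L generalizing a with
  | nil => simp
  | cons x L ih =>
    have hx : x ∉ L := (List.nodup_cons.mp hL).1
    rw [List.foldl_cons, ih (List.nodup_cons.mp hL).2,
        pvCountP_cons ys x L hx]
    push_cast; ring

-- ===== VERDICT (by name: the statement is the Claim_ definition above) =====
theorem conta_consoantes_spec : Claim_equal_conta_consoantes := by
  intro palavra _
  unfold Spec_conta_consoantes conta_consoantes conta_consoantes_alt
  -- rewrite B's dict lookups to counts over the lowered char list
  have hfreq : ∀ x : Char,
      ((PySem.Str.lower palavra).toList.foldl
        (fun (d : PySem.Dict Char Int) ch => d.insert ch (d.getD ch 0 + 1))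
        PySem.Dict.empty).getD x 0
      = ((PySem.Str.lower palavra).toList.count x : Int) := by
    intro x
    rw [PySem.Dict.getD_foldl_insert_add_one]
    simp
  simp only [hfreq]
  rw [pvA_fold,
      pvB_sum "aeiou".toList (by decide) _ 0,
      pvB_sum "bcdfghjklmnpqrstvwxyz".toList (by decide) _ 0,
      PySem.Str.toList_lower]
  have hmap : PySem.Chars.lower palavra.toList
      = palavra.toList.map PySem.Chars.lowerChar := rfl
  rw [hmap, List.countP_map, List.countP_map]
  -- the consonant alphabet is disjoint from the vowels, so A's elif guard is redundant
  have hcong : palavra.toList.countP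
        ((fun y => decide (y ∈ "bcdfghjklmnpqrstvwxyz".toList)) ∘ PySem.Chars.lowerChar)
      = palavra.toList.countP
        (fun l => decide (PySem.Chars.lowerChar l ∉ "aeiou".toList ∧
                          PySem.Chars.lowerChar l ∈ "bcdfghjklmnpqrstvwxyz".toList)) := by
    apply List.countP_congr
    intro l _
    by_cases hv : PySem.Chars.lowerChar l ∈ "aeiou".toList
    · have hc : PySem.Chars.lowerChar l ∉ "bcdfghjklmnpqrstvwxyz".toList := by
        rw [show "aeiou".toList = ['a', 'e', 'i', 'o', 'u'] from rfl] at hv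
        simp only [List.mem_cons, List.not_mem_nil, or_false] at hv
        rcases hv with h | h | h | h | h <;> rw [h] <;> decide
      simp only [Function.comp_apply, decide_eq_true_eq]
      exact ⟨fun h => absurd h hc, fun h => absurd h.2 hc⟩
    · simp only [Function.comp_apply, decide_eq_true_eq]
      exact ⟨fun h => ⟨hv, h⟩, fun h => h.2⟩
  rw [hcong]
  rfl
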